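-- pv_equiv track=rewrite | github.com/xiaohehao2009/lib | py/prss/main.py | is_normal
-- ===== SOURCE A (Python) =====
-- def is_normal(left, target_number=1):
--     pool, last_pool = [], [left]
--     for array in last_pool:
--         if target_number not in array:
--             continue
--         index = last_index = array.index(target_number)
--         for index in range(index + 1, len(array)):
--             if array[index] == target_number:
--                 pool.append(array[last_index:index])
--                 last_index = index
--         pool.append(array[last_index:])
--     if not pool:
--         return True
--     for index in range(1, len(pool)):
--         if dict_gt(pool[index], pool[index - 1]):
--             return False
--     for array in pool:
--         if not is_normal(array, target_number + 1):
--             return False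
--     return True
--
-- def dict_gt(left, right):
--     for index in range(min(len(left), len(right))):
--         if left[index] > right[index]:
--             return True
--         if left[index] < right[index]:
--             return False
--     return len(left) > len(right)
-- ===== SOURCE B (Python) =====
-- def is_normal(left, target_number=1):
--     stack = [(left, target_number)]
--     while stack:
--         arr, t = stack.pop()
--         idxs = [i for i, v in enumerate(arr) if v == t]
--         segs = [arr[i:j] for i, j in zip(idxs, idxs[1:] + [len(arr)])]
--         for prev, cur in zip(segs, segs[1:]):
--             if dict_gt(cur, prev):
--                 return False
--         stack.extend((seg, t + 1) for seg in segs)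
--     return True
--
-- def dict_gt(left, right):
--     for index in range(min(len(left), len(right))):
--         if left[index] > right[index]:
--             return True
--         if left[index] < right[index]:
--             return False
--     return len(left) > len(right)
-- ===== Notes on version B (the rewrite author's own statement) =====
-- stated objective: alternative
-- what changed: Replaces A's recursion with an explicit worklist loop, and builds the segments by first collecting all occurrence indices with enumerate and slicing between consecutive indices (zip) instead of A's imperative scan with last_index bookkeeping; adjacent segments are compared by zipping the segment list with its tail instead of indexing.
import Mathlib
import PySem

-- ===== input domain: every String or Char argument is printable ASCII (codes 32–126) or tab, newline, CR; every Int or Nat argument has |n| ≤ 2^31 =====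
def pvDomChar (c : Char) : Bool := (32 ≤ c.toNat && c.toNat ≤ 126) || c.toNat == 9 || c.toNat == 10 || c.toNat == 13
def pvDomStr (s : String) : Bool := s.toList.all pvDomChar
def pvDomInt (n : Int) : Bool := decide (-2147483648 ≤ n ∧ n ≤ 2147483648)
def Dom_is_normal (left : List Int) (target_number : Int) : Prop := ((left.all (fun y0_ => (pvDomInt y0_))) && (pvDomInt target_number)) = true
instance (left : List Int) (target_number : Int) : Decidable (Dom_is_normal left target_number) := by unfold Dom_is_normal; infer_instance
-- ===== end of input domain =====

-- B replaces A's recursion by an explicit worklist loop and builds the segments from the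
-- list of occurrence indices (enumerate + zip of consecutive indices) instead of A's
-- imperative scan with last_index bookkeeping; same return value (objective: alternative).

-- Termination measure shared by both ports: number of distinct values ≥ t in the array.
def pvMu (a : List Int) (t : Int) : Nat := ((a.filter (fun v => decide (t ≤ v))).dedup).length

theorem pvMu_lt {a s : List Int} {t : Int} (hsub : ∀ x ∈ s, x ∈ a) (ht : t ∈ a) :
    pvMu s (t + 1) < pvMu a t := by
  unfold pvMu
  rw [← List.card_toFinset, ← List.card_toFinset]
  apply Finset.card_lt_card
  constructor
  · intro x hx
    simp only [List.toFinset_filter, Finset.mem_filter, List.mem_toFinset,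
      decide_eq_true_eq] at *
    exact ⟨hsub x hx.1, by omega⟩
  · intro hle
    have hmem : t ∈ (a.filter (fun v => decide (t ≤ v))).toFinset := by
      simp [List.toFinset_filter, ht]
    have := hle hmem
    simp [List.toFinset_filter] at this

-- ===== PORT A =====
def dict_gt_go (l r : List Int) : List Int → Bool
  | [] => decide (r.length < l.length)
  | i :: rest =>
    if PySem.List.pyGetD l i 0 > PySem.List.pyGetD r i 0 then true
    else if PySem.List.pyGetD l i 0 < PySem.List.pyGetD r i 0 then false
    else dict_gt_go l r rest

def dict_gt (l r : List Int) : Bool :=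
  dict_gt_go l r (PySem.List.pyRange 0 ((min l.length r.length : Nat) : Int) 1)

-- one step of A's inner scan: 'if array[index] == target: pool.append(array[last_index:index]); last_index = index'
def pvStepA (a : List Int) (t : Int) (st : List (List Int) × Int) (index : Int) : List (List Int) × Int :=
  if PySem.List.pyGetD a index 0 == t
  then (st.1 ++ [PySem.List.slice a (some st.2) (some index)], index)
  else st

-- A's pool-building phase (the 'for array in last_pool' loop runs once, over [left])
def poolA (a : List Int) (t : Int) : List (List Int) :=
  match PySem.List.index? a t with
  | none => []
  | some i0 =>
    let st := (PySem.List.pyRange ((i0 : Int) + 1) (a.length : Int) 1).foldl (pvStepA a t) ([], (i0 : Int))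
    st.1 ++ [PySem.List.slice a (some st.2) none]

theorem foldl_stepA_inv (a : List Int) (t : Int) (l : List Int) :
    ∀ (pool : List (List Int)) (last : Int), (∀ s ∈ pool, ∀ x ∈ s, x ∈ a) →
      ∀ s ∈ (l.foldl (pvStepA a t) (pool, last)).1, ∀ x ∈ s, x ∈ a := by
  induction l with
  | nil => intro pool last hp; exact hp
  | cons i l ih =>
    intro pool last hp
    simp only [List.foldl_cons]
    unfold pvStepA
    split
    · exact ih _ _ (by
        intro s hs
        rcases List.mem_append.mp hs with h | h
        · exact hp s h
        · simp only [List.mem_singleton] at h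
          subst h
          intro x hx
          exact PySem.List.mem_of_mem_slice _ _ _ hx)
    · exact ih _ _ hp

theorem poolA_sub {a : List Int} {t : Int} {s : List Int} (hs : s ∈ poolA a t) :
    ∀ x ∈ s, x ∈ a := by
  unfold poolA at hs
  cases h : PySem.List.index? a t with
  | none => rw [h] at hs; simp at hs
  | some i0 =>
    rw [h] at hs
    simp only at hs
    rcases List.mem_append.mp hs with h2 | h2
    · exact foldl_stepA_inv a t _ [] (i0 : Int) (by simp) s h2
    · simp only [List.mem_singleton] at h2
      subst h2
      intro x hx
      exact PySem.List.mem_of_mem_slice _ _ _ hx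

theorem poolA_mem_of_ne_nil {a : List Int} {t : Int} {s : List Int} (hs : s ∈ poolA a t) :
    t ∈ a := by
  unfold poolA at hs
  cases h : PySem.List.index? a t with
  | none => rw [h] at hs; simp at hs
  | some i0 =>
    have : (PySem.List.index? a t).isSome := by rw [h]; rfl
    exact (PySem.List.index?_isSome_iff a t).mp this

def is_normal (left : List Int) (target_number : Int) : Bool :=
  if poolA left target_number = [] then true
  else if (PySem.List.pyRange 1 ((poolA left target_number).length : Int) 1).any
      (fun index => dict_gt (PySem.List.pyGetD (poolA left target_number) index [])
                            (PySem.List.pyGetD (poolA left target_number) (index - 1) [])) then false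
  else (poolA left target_number).attach.all (fun s => is_normal s.1 (target_number + 1))
termination_by pvMu left target_number
decreasing_by exact pvMu_lt (poolA_sub s.2) (poolA_mem_of_ne_nil s.2)

-- ===== PORT B =====
-- idxs = [i for i, v in enumerate(arr) if v == t]
def pvIdxs (arr : List Int) (t : Int) : List Int :=
  ((PySem.List.enumerate arr 0).filter (fun p => p.2 == t)).map (fun p => p.1)

-- segs = [arr[i:j] for i, j in zip(idxs, idxs[1:] + [len(arr)])]
def pvSegs (arr : List Int) (t : Int) : List (List Int) :=
  ((pvIdxs arr t).zip (PySem.List.slice (pvIdxs arr t) (some 1) none ++ [(arr.length : Int)])).map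
    (fun p => PySem.List.slice arr (some p.1) (some p.2))

theorem pvSegs_sub {a : List Int} {t : Int} {s : List Int} (hs : s ∈ pvSegs a t) :
    ∀ x ∈ s, x ∈ a := by
  unfold pvSegs at hs
  rcases List.mem_map.mp hs with ⟨p, _, hp⟩
  subst hp
  intro x hx
  exact PySem.List.mem_of_mem_slice _ _ _ hx

theorem pvSegs_mem_of_ne_nil {a : List Int} {t : Int} {s : List Int} (hs : s ∈ pvSegs a t) :
    t ∈ a := by
  unfold pvSegs at hs
  rcases List.mem_map.mp hs with ⟨p, hpz, _⟩
  have hidx : p.1 ∈ pvIdxs a t := (List.of_mem_zip hpz).1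
  unfold pvIdxs at hidx
  rcases List.mem_map.mp hidx with ⟨q, hq, _⟩
  have hq2 := List.of_mem_filter hq
  have hqe := List.mem_of_mem_filter hq
  rcases (PySem.List.mem_enumerate_iff _ _ _).mp hqe with ⟨k, hk, hqeq⟩
  subst hqeq
  simp only [beq_iff_eq] at hq2
  rw [← hq2]
  exact List.getElem_mem hk

-- size of the recursion tree rooted at (arr, t); used only as the worklist's termination measure
def pvNodes (arr : List Int) (t : Int) : Nat :=
  1 + ((pvSegs arr t).attach.map (fun s => pvNodes s.1 (t + 1))).sum
termination_by pvMu arr t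
decreasing_by exact pvMu_lt (pvSegs_sub s.2) (pvSegs_mem_of_ne_nil s.2)

theorem pvNodes_attach_sum (arr : List Int) (t : Int) :
    ((pvSegs arr t).map (fun s => pvNodes s (t + 1))).sum + 1 = pvNodes arr t := by
  rw [pvNodes]
  simp [Nat.add_comm]

-- the 'while stack:' loop; Lean list head = Python stack top (stack.pop())
def pvLoopB : List (List Int × Int) → Bool
  | [] => true
  | (arr, t) :: rest =>
    if ((pvSegs arr t).zip (PySem.List.slice (pvSegs arr t) (some 1) none)).any
        (fun p => dict_gt p.2 p.1) then false
    else pvLoopB (((pvSegs arr t).map (fun seg => (seg, t + 1))).reverse ++ rest)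
termination_by stack => (stack.map (fun p => pvNodes p.1 p.2)).sum
decreasing_by
  simp only [List.map_append, List.map_reverse, List.map_map, List.sum_append, List.sum_reverse,
    List.map_cons, List.sum_cons]
  have h := pvNodes_attach_sum arr t
  simp only [Function.comp_def] at *
  omega

def is_normal_alt (left : List Int) (target_number : Int) : Bool :=
  pvLoopB [(left, target_number)]

-- ===== PRECONDITION & SPEC =====
def Spec_is_normal (left : List Int) (target_number : Int) (out : Bool) : Prop := out = is_normal_alt left target_number
instance (left : List Int) (target_number : Int) (out : Bool) : Decidable (Spec_is_normal left target_number out) := by unfold Spec_is_normal; infer_instance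

-- ===== CLAIM (what is proved, stated in full; the proofs are below) =====
def Claim_equal_is_normal : Prop := ∀ (left : List Int) (target_number : Int), Dom_is_normal left target_number → Spec_is_normal left target_number (is_normal left target_number)

-- ===== LEMMAS AND PROOFS =====

def pvChain (a : List Int) : Int → List Int → List (List Int)
  | _, [] => []
  | last, i :: is => PySem.List.slice a (some last) (some i) :: pvChain a i is

def pvLastD : Int → List Int → Int
  | last, [] => last
  | _, i :: is => pvLastD i is

theorem pvChain_append (a : List Int) (O : List Int) : ∀ (last j : Int),
    pvChain a last (O ++ [j])
    = pvChain a last O ++ [PySem.List.slice a (some (pvLastD last O)) (some j)] := by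
  induction O with
  | nil => intro last j; simp [pvChain, pvLastD]
  | cons i is ih => intro last j; simp [pvChain, pvLastD, ih]

theorem pvLastD_append (O : List Int) : ∀ (last j : Int), pvLastD last (O ++ [j]) = j := by
  induction O with
  | nil => intro last j; simp [pvLastD]
  | cons i is ih => intro last j; simp [pvLastD, ih]

theorem pvLastD_nonneg (O : List Int) : ∀ (last : Int), 0 ≤ last → (∀ j ∈ O, 0 ≤ j) →
    0 ≤ pvLastD last O := by
  induction O with
  | nil => intro last h _; simpa [pvLastD] using h
  | cons i is ih =>
    intro last h hm
    simp only [pvLastD]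
    exact ih i (hm i (by simp)) (fun j hj => hm j (by simp [hj]))

theorem foldA_char (a : List Int) (t : Int) (m : Int) (N : Nat) :
    ∀ (pool : List (List Int)) (last : Int),
    (PySem.List.pyRange m (m + N) 1).foldl (pvStepA a t) (pool, last)
    = (pool ++ pvChain a last ((PySem.List.pyRange m (m + N) 1).filter
          (fun j => PySem.List.pyGetD a j 0 == t)),
       pvLastD last ((PySem.List.pyRange m (m + N) 1).filter
          (fun j => PySem.List.pyGetD a j 0 == t))) := by
  induction N with
  | zero =>
    intro pool last
    rw [PySem.List.pyRange_one_eq_nil (by omega)]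
    simp [pvChain, pvLastD]
  | succ N ih =>
    intro pool last
    have hcast : m + ((N + 1 : Nat) : Int) = (m + (N : Int)) + 1 := by push_cast; ring
    rw [hcast, PySem.List.pyRange_one_succ_right (by omega), List.foldl_append,
      List.filter_append, ih]
    simp only [List.foldl_cons, List.foldl_nil, List.filter_cons, List.filter_nil]
    unfold pvStepA
    by_cases h : PySem.List.pyGetD a (m + (N : Int)) 0 == t
    · simp [h, pvChain_append, pvLastD_append]
    · simp [h]

theorem idxs_char (a : List Int) (t : Int) :
    pvIdxs a t = (PySem.List.pyRange 0 (a.length : Int) 1).filter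
      (fun j => PySem.List.pyGetD a j 0 == t) := by
  unfold pvIdxs
  rw [PySem.List.enumerate_eq_map_pyRange (d := 0), List.filter_map, List.map_map]
  simp [Function.comp_def]

theorem slice_none_eq_len (a : List Int) (v : Int) (hv : 0 ≤ v) :
    PySem.List.slice a (some v) none = PySem.List.slice a (some v) (some (a.length : Int)) := by
  rw [PySem.List.slice_from _ hv, PySem.List.slice_toNat _ hv (by positivity)]
  rw [List.take_of_length_le]
  simp

theorem zip_chain (a : List Int) (L : Int) (O : List Int) : ∀ (i0 : Int),
    ((i0 :: O).zip (O ++ [L])).map (fun p => PySem.List.slice a (some p.1) (some p.2))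
    = pvChain a i0 O ++ [PySem.List.slice a (some (pvLastD i0 O)) (some L)] := by
  induction O with
  | nil => intro i0; simp [pvChain, pvLastD]
  | cons j is ih => intro i0; simp [pvChain, pvLastD, ih]

theorem pool_eq (a : List Int) (t : Int) : poolA a t = pvSegs a t := by
  unfold poolA pvSegs
  cases h : PySem.List.index? a t with
  | none =>
    have ht : t ∉ a := (PySem.List.index?_eq_none_iff a t).mp h
    have hfil : pvIdxs a t = [] := by
      rw [idxs_char]
      apply List.filter_eq_nil_iff.mpr
      intro j hj
      have hj' := PySem.List.mem_pyRange_one.mp hj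
      have hin : PySem.List.pyGetD a j 0 ∈ a := by
        rw [PySem.List.pyGetD_eq_getElem (xs := a) (d := 0) hj'.1 (by exact_mod_cast hj'.2)]
        exact List.getElem_mem _
      simp only [beq_iff_eq]
      intro hEq
      exact ht (hEq ▸ hin)
    rw [hfil]
    simp
  | some i0 =>
    rcases PySem.List.getElem_of_index?_eq_some h with ⟨hk, hval, hpre⟩
    have hidxs : pvIdxs a t = (i0 : Int) ::
        ((PySem.List.pyRange ((i0 : Int) + 1) (a.length : Int) 1).filter
          (fun j => PySem.List.pyGetD a j 0 == t)) := by
      rw [idxs_char]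
      rw [PySem.List.pyRange_one_append 0 (i0 : Int) (a.length : Int) (by omega)
        (by exact_mod_cast Nat.le_of_lt hk)]
      rw [PySem.List.pyRange_one_append (i0 : Int) ((i0 : Int) + 1) (a.length : Int)
        (by omega) (by exact_mod_cast hk)]
      rw [PySem.List.pyRange_one_singleton]
      rw [List.filter_append, List.filter_append]
      have h1 : (PySem.List.pyRange 0 (i0 : Int) 1).filter
          (fun j => PySem.List.pyGetD a j 0 == t) = [] := by
        apply List.filter_eq_nil_iff.mpr
        intro j hj
        have hj' := PySem.List.mem_pyRange_one.mp hj
        have hjlt : j.toNat < i0 := by omega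
        rw [PySem.List.pyGetD_eq_getElem (xs := a) (d := 0) hj'.1
          (by omega)]
        simp only [beq_iff_eq]
        exact hpre j.toNat hjlt
      have h2 : ([(i0 : Int)].filter (fun j => PySem.List.pyGetD a j 0 == t)) = [(i0 : Int)] := by
        simp [PySem.List.pyGetD_eq_getElem (xs := a) (d := 0) (i := (i0 : Int)) (by omega)
          (by exact_mod_cast hk), hval]
      rw [h1, h2]
      simp
    rw [hidxs]
    simp only
    -- evaluate the fold over the scan range
    have hN : (a.length : Int) = ((i0 : Int) + 1) + ((a.length - (i0 + 1) : Nat) : Int) := by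
      omega
    set P : Int → Bool := fun j => PySem.List.pyGetD a j 0 == t with hP
    set O : List Int := (PySem.List.pyRange ((i0 : Int) + 1) (a.length : Int) 1).filter P with hO
    have hfold := foldA_char a t ((i0 : Int) + 1) (a.length - (i0 + 1)) [] (i0 : Int)
    rw [← hN] at hfold
    rw [hfold]
    simp only [List.nil_append]
    -- the B side
    rw [PySem.List.slice_from_one]
    simp only [List.tail_cons]
    rw [zip_chain]
    -- last slice: [last:] vs [last:len]
    have hOnn : ∀ j ∈ O, 0 ≤ j := by
      intro j hj
      rw [hO] at hj
      have := PySem.List.mem_pyRange_one.mp (List.mem_of_mem_filter hj)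
      omega
    rw [slice_none_eq_len a _ (pvLastD_nonneg O (i0 : Int) (by omega) hOnn)]


theorem adj_core (l : List (List Int)) :
    (List.range (l.length - 1)).any (fun k => dict_gt (l.getD (k + 1) []) (l.getD k []))
    = (l.zip l.tail).any (fun p => dict_gt p.2 p.1) := by
  induction l with
  | nil => simp
  | cons x xs ih =>
    cases xs with
    | nil => simp
    | cons y r =>
      have hlen : (x :: y :: r).length - 1 = (y :: r).length - 1 + 1 := by simp
      rw [hlen, List.range_succ_eq_map]
      simp only [List.any_cons, List.any_map, Function.comp_def, Nat.succ_eq_add_one,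
        List.getD_cons_succ, List.getD_cons_zero, List.zip_cons_cons, List.tail_cons,
        List.any_cons] at ih ⊢
      rw [ih]

theorem adj_eq (l : List (List Int)) :
    (PySem.List.pyRange 1 (l.length : Int) 1).any
      (fun index => dict_gt (PySem.List.pyGetD l index []) (PySem.List.pyGetD l (index - 1) []))
    = (l.zip (PySem.List.slice l (some 1) none)).any (fun p => dict_gt p.2 p.1) := by
  rw [PySem.List.slice_from_one, ← adj_core, PySem.List.pyRange_one, List.any_map]
  have hN : ((l.length : Int) - 1).toNat = l.length - 1 := by omega
  rw [hN]
  apply PySem.List.any_congr_mem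
  intro k hk
  simp only [List.mem_range] at hk
  simp only [Function.comp_def]
  have h1 : (1 : Int) + (k : Int) = ((k + 1 : Nat) : Int) := by push_cast; ring
  have h2 : ((k + 1 : Nat) : Int) - 1 = ((k : Nat) : Int) := by push_cast; ring
  rw [h1]
  rw [PySem.List.pyGetD_natCast]
  congr 1
  rw [h2, PySem.List.pyGetD_natCast]

theorem isNormal_char (arr : List Int) (t : Int) :
    is_normal arr t =
      (!(((pvSegs arr t).zip (PySem.List.slice (pvSegs arr t) (some 1) none)).any
          (fun p => dict_gt p.2 p.1))
        && (pvSegs arr t).all (fun s => is_normal s (t + 1))) := by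
  rw [is_normal]
  rw [pool_eq, adj_eq]
  by_cases hnil : pvSegs arr t = []
  · simp [hnil]
  · rw [if_neg hnil]
    by_cases hany : ((pvSegs arr t).zip
        (PySem.List.slice (pvSegs arr t) (some 1) none)).any (fun p => dict_gt p.2 p.1)
    · simp [hany]
    · simp [hany]

theorem loopB_all (stack : List (List Int × Int)) :
    pvLoopB stack = stack.all (fun p => is_normal p.1 p.2) := by
  induction stack using pvLoopB.induct with
  | case1 => simp [pvLoopB]
  | case2 arr t rest h =>
    rw [pvLoopB, if_pos h]
    simp only [List.all_cons]
    rw [isNormal_char]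
    simp [h]
  | case3 arr t rest h ih =>
    rw [pvLoopB, if_neg h, ih]
    simp only [List.all_append, List.all_reverse, List.all_map, List.all_cons]
    rw [isNormal_char]
    simp only [h, Bool.not_false, Bool.true_and, Function.comp_def]

-- ===== VERDICT (by name: the statement is the Claim_ definition above) =====
theorem is_normal_spec : Claim_equal_is_normal := by
  intro left target_number _
  unfold Spec_is_normal is_normal_alt
  rw [loopB_all]
  simp
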